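-- pv_equiv track=rewrite | github.com/Biswayan-Mehra/KITS-LABS | Operating Systems LAB/OS_EX8.py | LRU_replacement
-- ===== SOURCE A (Python) =====
-- def LRU_replacement(pages, frames):
--     hits = 0
--     misses = 0
--     page_frames = list()
--     for page in pages:
--         if page not in page_frames:
--             page_frames.append(page)
--             misses += 1
--         else:
--             page_frames.remove(page)
--             page_frames.append(page)
--             hits += 1
--         while len(page_frames) > frames:
--             page_frames = page_frames[1:]
--     return hits, misses
-- ===== SOURCE B (Python) =====
-- def LRU_replacement(pages, frames):
--     # Reuse-distance formulation: an access is a hit iff the page occurred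
--     # before and the number of distinct pages seen since that occurrence is
--     # < frames.  No frame list is simulated and nothing is ever evicted.
--     hits = 0
--     before = []  # pages processed so far, most recent first
--     for p in pages:
--         distinct = set()
--         for q in before:
--             if q == p:
--                 if len(distinct) < frames:
--                     hits += 1
--                 break
--             distinct.add(q)
--         before.insert(0, p)
--     return hits, len(pages) - hits
-- ===== Notes on version B (the rewrite author's own statement) =====
-- stated objective: alternative
-- what changed: B replaces A's explicit frame-list simulation (move-to-back on hit, trim-from-front eviction) by a reuse-distance computation: an access is a hit iff the page occurred before and the number of distinct pages seen since its most recent occurrence is < frames; misses are returned as len(pages) - hits, no frame list is ever maintained.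
import Mathlib
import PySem

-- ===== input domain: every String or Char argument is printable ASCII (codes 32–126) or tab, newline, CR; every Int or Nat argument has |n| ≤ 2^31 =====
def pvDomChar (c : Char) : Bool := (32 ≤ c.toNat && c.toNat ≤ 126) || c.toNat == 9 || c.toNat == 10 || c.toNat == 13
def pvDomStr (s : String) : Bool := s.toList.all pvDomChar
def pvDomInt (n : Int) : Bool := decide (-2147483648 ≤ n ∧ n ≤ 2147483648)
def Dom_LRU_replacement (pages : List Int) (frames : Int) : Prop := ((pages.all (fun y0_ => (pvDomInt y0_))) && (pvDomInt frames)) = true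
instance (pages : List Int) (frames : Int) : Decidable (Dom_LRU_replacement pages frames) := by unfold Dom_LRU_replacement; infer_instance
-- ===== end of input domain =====

-- B replaces A's frame-list simulation by a reuse-distance computation (hit iff the number of
-- distinct pages since the page's previous access is < frames); objective: alternative.


-- ===== PORT A =====
-- 'while len(page_frames) > frames: page_frames = page_frames[1:]'; structural recursion on the
-- list (each iteration drops the head).  The [] case only exits the loop when frames < 0, where
-- the Python while-loop never terminates; such inputs are outside Pre_.
def aTrim (frames : Int) : List Int → List Int
  | [] => []
  | x :: xs => if ((x :: xs).length : Int) > frames then aTrim frames xs else x :: xs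

-- one iteration of A's 'for page in pages' loop over the state (hits, misses, page_frames)
def aStep (frames : Int) (st : Int × Int × List Int) (page : Int) : Int × Int × List Int :=
  match st with
  | (hits, misses, pf) =>
    if page ∉ pf then
      (hits, misses + 1, aTrim frames (pf ++ [page]))
    else
      (hits + 1, misses, aTrim frames (((PySem.List.remove? pf page).getD pf) ++ [page]))

def LRU_replacement (pages : List Int) (frames : Int) : List Int :=
  match pages.foldl (aStep frames) (0, 0, []) with
  | (hits, misses, _) => [hits, misses]

-- ===== PORT B =====
-- inner 'for q in before' loop: stop at the first q == page, hit iff len(distinct) < frames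
def bScan (p frames : Int) : List Int → PySem.Set Int → Bool
  | [], _ => false
  | q :: qs, distinct =>
    if q = p then decide (PySem.Set.len distinct < frames)
    else bScan p frames qs (PySem.Set.add distinct q)

-- one iteration of B's outer loop over the state (hits, before)
def bStep (frames : Int) (st : Int × List Int) (p : Int) : Int × List Int :=
  match st with
  | (hits, before) =>
    ((if bScan p frames before PySem.Set.empty then hits + 1 else hits), p :: before)

def LRU_replacement_alt (pages : List Int) (frames : Int) : List Int :=
  match pages.foldl (bStep frames) (0, []) with
  | (hits, _) => [hits, (pages.length : Int) - hits]

-- ===== PRECONDITION & SPEC =====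
-- Pre_ excludes frames < 0 with a nonempty pages list: there A's 'while len(page_frames) > frames'
-- never terminates (A returns no value), so nothing is claimed about those inputs.
def Pre_LRU_replacement (pages : List Int) (frames : Int) : Prop := 0 ≤ frames ∨ pages = []
instance (pages : List Int) (frames : Int) : Decidable (Pre_LRU_replacement pages frames) := by
  unfold Pre_LRU_replacement; infer_instance

def pvWitness_LRU_replacement : List Int × Int := ([1, 2, 3, 1, 2, 4, 1], 2)

def Spec_LRU_replacement (pages : List Int) (frames : Int) (out : List Int) : Prop := out = LRU_replacement_alt pages frames
instance (pages : List Int) (frames : Int) (out : List Int) : Decidable (Spec_LRU_replacement pages frames out) := by unfold Spec_LRU_replacement; infer_instance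

-- ===== CLAIM (what is proved, stated in full; the proofs are below) =====
def Claim_equal_LRU_replacement : Prop := ∀ (pages : List Int) (frames : Int), Dom_LRU_replacement pages frames → Pre_LRU_replacement pages frames → Spec_LRU_replacement pages frames (LRU_replacement pages frames)

-- ===== LEMMAS AND PROOFS =====

-- ghost state: the distinct pages of the processed prefix, most recent first
def df : List Int → List Int
  | [] => []
  | x :: xs => x :: (df xs).erase x

theorem nodup_df : ∀ (l : List Int), (df l).Nodup := by
  intro l; induction l with
  | nil => simp [df]
  | cons x xs ih =>
    simp only [df]
    exact List.Nodup.cons (by simp [List.Nodup.mem_erase_iff ih]) (ih.erase x)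

theorem mem_df {p : Int} : ∀ {l : List Int}, p ∈ df l ↔ p ∈ l := by
  intro l; induction l with
  | nil => simp [df]
  | cons x xs ih =>
    simp only [df, List.mem_cons]
    constructor
    · rintro (rfl | h)
      · exact .inl rfl
      · exact .inr (ih.mp (List.mem_of_mem_erase h))
    · rintro (rfl | h)
      · exact .inl rfl
      · by_cases hx : p = x
        · exact .inl hx
        · exact .inr ((List.Nodup.mem_erase_iff (nodup_df xs)).mpr ⟨hx, ih.mpr h⟩)

-- A trims nothing when the list already fits
theorem aTrim_id {f : Int} {l : List Int} (_hf : 0 ≤ f) (hl : (l.length : Int) ≤ f) :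
    aTrim f l = l := by
  cases l with
  | nil => simp [aTrim]
  | cons x xs =>
    simp only [aTrim]
    split
    · omega
    · rfl

-- L2: erasing an element of the taken prefix of a nodup list
theorem take_erase_of_mem : ∀ {l : List Int} {k : Nat} {p : Int}, l.Nodup → p ∈ l.take k →
    (l.take k).erase p = (l.erase p).take (k - 1) := by
  intro l
  induction l with
  | nil => intro k p _ hp; simp at hp
  | cons x xs ih =>
    intro k p hnd hp
    cases k with
    | zero => simp at hp
    | succ k' =>
      simp only [List.take_succ_cons] at hp ⊢
      by_cases hx : x = p
      · subst hx
        rw [List.erase_cons_head, List.erase_cons_head]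
        simp
      · have hp' : p ∈ xs.take k' := by
          rcases List.mem_cons.mp hp with h | h
          · exact absurd h.symm hx
          · exact h
        have hk' : k' ≠ 0 := by intro h; subst h; simp at hp'
        obtain ⟨k'', rfl⟩ := Nat.exists_eq_succ_of_ne_zero hk'
        rw [List.erase_cons_tail (by simp [hx]), List.erase_cons_tail (by simp [hx])]
        simp only [Nat.succ_sub_one, List.take_succ_cons]
        rw [ih hnd.of_cons hp']
        simp

-- L3: erasing an element NOT in the first k elements leaves take (k-1) unchanged
theorem take_erase_of_not_mem : ∀ {l : List Int} {k : Nat} {p : Int}, p ∉ l.take k →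
    (l.erase p).take (k - 1) = l.take (k - 1) := by
  intro l
  induction l with
  | nil => intro k p _; simp
  | cons x xs ih =>
    intro k p hp
    cases k with
    | zero => simp
    | succ k' =>
      simp only [List.take_succ_cons, List.mem_cons, not_or] at hp
      rw [List.erase_cons_tail (by simp; exact fun h => hp.1 h.symm)]
      cases k' with
      | zero => simp
      | succ k'' =>
        simp only [Nat.succ_sub_one, List.take_succ_cons]
        have := ih (k := k'' + 1) hp.2
        simp only [Nat.add_sub_cancel] at this
        rw [this]

-- reverse/erase commute on nodup lists
theorem reverse_erase {l : List Int} {p : Int} (h : l.Nodup) :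
    l.reverse.erase p = (l.erase p).reverse := by
  rw [List.Nodup.erase_eq_filter (by simpa using h), List.Nodup.erase_eq_filter h,
    List.filter_reverse]

-- df decomposition at the first occurrence
theorem df_decomp : ∀ {u : List Int} {p : Int} (v : List Int), p ∉ u →
    ∃ r, df (u ++ p :: v) = df u ++ p :: r := by
  intro u
  induction u with
  | nil => intro p v _; exact ⟨(df v).erase p, rfl⟩
  | cons x u' ih =>
    intro p v hp
    simp only [List.mem_cons, not_or] at hp
    obtain ⟨r, hr⟩ := ih v hp.2
    simp only [List.cons_append, df, hr]
    by_cases hx : x ∈ df u'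
    · exact ⟨r, by rw [List.erase_append_left _ hx]⟩
    · refine ⟨r.erase x, ?_⟩
      rw [List.erase_append_right _ hx,
        List.erase_cons_tail (by simp [hp.1]),
        List.erase_of_not_mem hx]

-- membership in a take of (A ++ p :: r) with p ∉ A
theorem mem_take_append {A r : List Int} {p : Int} {k : Nat} (hp : p ∉ A) :
    p ∈ (A ++ p :: r).take k ↔ A.length < k := by
  rw [List.take_append]
  constructor
  · intro h
    rcases List.mem_append.mp h with h | h
    · exact absurd (List.mem_of_mem_take h) hp
    · by_contra hk
      have : k - A.length = 0 := by omega
      simp [this] at h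
  · intro h
    have : ∃ n, k - A.length = n + 1 := ⟨k - A.length - 1, by omega⟩
    obtain ⟨n, hn⟩ := this
    refine List.mem_append.mpr (.inr ?_)
    rw [hn, List.take_succ_cons]
    exact List.mem_cons_self

-- hit characterization for A's membership test
theorem mem_take_df_iff {before : List Int} {p : Int} {k : Nat} :
    p ∈ (df before).take k ↔
      (p ∈ before ∧ (df (before.takeWhile (fun q => q != p))).length < k) := by
  by_cases hp : p ∈ before
  · simp only [hp, true_and]
    have hne : before.dropWhile (fun q => q != p) ≠ [] := by
      intro h
      have := List.takeWhile_append_dropWhile (p := fun q => q != p) (l := before)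
      rw [h, List.append_nil] at this
      rw [← this] at hp
      have := List.mem_takeWhile_imp hp
      simp at this
    have hhead : (before.dropWhile (fun q => q != p)).head hne = p := by
      have := List.head_dropWhile_not (p := fun q => q != p) (l := before) hne
      simpa using this
    have hsplit : before.takeWhile (fun q => q != p) ++
        p :: (before.dropWhile (fun q => q != p)).tail = before := by
      have h2 : p :: (before.dropWhile (fun q => q != p)).tail =
          before.dropWhile (fun q => q != p) := by
        conv_rhs => rw [← List.cons_head_tail hne]
        rw [hhead]
      conv_rhs => rw [← List.takeWhile_append_dropWhile (p := fun q => q != p) (l := before)]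
      rw [h2]
    have hpu : p ∉ before.takeWhile (fun q => q != p) := by
      intro h
      have := List.mem_takeWhile_imp h
      simp at this
    obtain ⟨r, hr⟩ := df_decomp (u := before.takeWhile (fun q => q != p))
      ((before.dropWhile (fun q => q != p)).tail) hpu
    have hpdfu : p ∉ df (before.takeWhile (fun q => q != p)) := fun h => hpu (mem_df.mp h)
    conv_lhs => rw [← hsplit]
    rw [hr]
    exact mem_take_append hpdfu
  · constructor
    · intro h
      exact absurd (mem_df.mp (List.mem_of_mem_take h)) hp
    · intro h
      exact absurd h.1 hp

-- scan invariant for B's inner loop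
theorem ofList_append_singleton (c : List Int) (q : Int) :
    PySem.Set.ofList (c ++ [q]) = PySem.Set.add (PySem.Set.ofList c) q := by
  simp [PySem.Set.ofList_eq_foldl, List.foldl_append]

theorem bScan_spec (p f : Int) : ∀ (l c : List Int),
    bScan p f l (PySem.Set.ofList c) =
      decide (p ∈ l ∧
        ((PySem.Set.ofList (c ++ l.takeWhile (fun q => q != p))).length : Int) < f) := by
  intro l
  induction l with
  | nil => intro c; simp [bScan]
  | cons q qs ih =>
    intro c
    by_cases hq : q = p
    · subst hq
      simp [bScan, PySem.Set.len]
    · rw [show (q :: qs).takeWhile (fun x => x != p) = q :: qs.takeWhile (fun x => x != p) by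
        simp [hq]]
      have : bScan p f (q :: qs) (PySem.Set.ofList c) =
          bScan p f qs (PySem.Set.ofList (c ++ [q])) := by
        simp [bScan, hq, ofList_append_singleton]
      rw [this, ih (c ++ [q])]
      have hmem : (p ∈ q :: qs) ↔ p ∈ qs := by
        constructor
        · intro h
          rcases List.mem_cons.mp h with h | h
          · exact absurd h.symm hq
          · exact h
        · exact fun h => List.mem_cons.mpr (.inr h)
      simp [List.append_assoc, hmem]

-- a Set.ofList has as many elements as df
theorem length_ofList_eq_df (u : List Int) :
    (PySem.Set.ofList u).length = (df u).length := by
  have h1 : (PySem.Set.ofList u : List Int).toFinset = (df u).toFinset := by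
    apply Finset.ext
    intro a
    simp [List.mem_toFinset, PySem.Set.mem_ofList, mem_df]
  rw [← List.toFinset_card_of_nodup (PySem.Set.nodup_ofList (xs := u)),
    ← List.toFinset_card_of_nodup (nodup_df u), h1]

-- B's hit test agrees with A's membership test
theorem bScan_eq_mem {before : List Int} {p f : Int} (hf : 0 ≤ f) :
    bScan p f before PySem.Set.empty = decide (p ∈ (df before).take f.toNat) := by
  have h0 : (PySem.Set.empty : PySem.Set Int) = PySem.Set.ofList [] := rfl
  rw [h0]
  have := bScan_spec p f before []
  simp only [List.nil_append] at this
  rw [this]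
  simp only [decide_eq_decide, mem_take_df_iff, length_ofList_eq_df]
  constructor
  · rintro ⟨h1, h2⟩; exact ⟨h1, by omega⟩
  · rintro ⟨h1, h2⟩; exact ⟨h1, by omega⟩

-- the single combined step
theorem step_eq {f : Int} (hf : 0 ≤ f) (before : List Int) (h m p : Int) :
    aStep f (h, m, ((df before).take f.toNat).reverse) p =
      ((if bScan p f before PySem.Set.empty then h + 1 else h),
       (if bScan p f before PySem.Set.empty then m else m + 1),
       ((df (p :: before)).take f.toNat).reverse) := by
  have hscan : bScan p f before PySem.Set.empty = decide (p ∈ (df before).take f.toNat) :=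
    bScan_eq_mem hf
  by_cases hmem : p ∈ (df before).take f.toNat
  · -- hit: the page is resident
    have hfN1 : f.toNat ≠ 0 := by intro h0; rw [h0] at hmem; simp at hmem
    obtain ⟨n, hn⟩ := Nat.exists_eq_succ_of_ne_zero hfN1
    have hpf : p ∈ ((df before).take f.toNat).reverse := by simpa using hmem
    have hnd : ((df before).take f.toNat).Nodup :=
      List.Nodup.sublist (List.take_sublist _ _) (nodup_df before)
    simp only [aStep, hscan, hmem, decide_true, if_true]
    rw [if_neg (not_not_intro hpf)]
    rw [PySem.List.remove?_eq_some_erase _ p hpf, Option.getD_some]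
    have e1 : ((df before).take f.toNat).reverse.erase p
        = (((df before).erase p).take n).reverse := by
      rw [reverse_erase hnd, take_erase_of_mem (nodup_df before) hmem, hn]
      simp
    rw [e1]
    have e2 : df (p :: before) = p :: (df before).erase p := rfl
    rw [e2, hn, List.take_succ_cons, List.reverse_cons]
    rw [aTrim_id hf (by
      have h1 : (((df before).erase p).take n).length ≤ n := by
        simp [List.length_take]
      simp only [List.length_append, List.length_reverse, List.length_cons,
        List.length_nil]
      push_cast
      omega)]
  · -- miss: the page is not resident
    have hscanf : bScan p f before PySem.Set.empty = false := by
      rw [hscan]; simpa using hmem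
    simp only [aStep, hscanf, if_false, Bool.false_eq_true]
    rw [if_pos (by simpa using hmem)]
    have e2 : df (p :: before) = p :: (df before).erase p := rfl
    rcases Nat.eq_zero_or_pos f.toNat with hfN | hfN
    · have hf0 : f = 0 := by omega
      subst hf0
      simp only [Int.toNat_zero, List.take_zero, List.reverse_nil, List.nil_append, e2]
      simp [aTrim]
    · obtain ⟨n, hn⟩ := Nat.exists_eq_succ_of_ne_zero (by omega : f.toNat ≠ 0)
      have e5 := take_erase_of_not_mem hmem
      rw [hn] at e5
      simp only [Nat.succ_sub_one] at e5
      have e3 : ((df (p :: before)).take f.toNat).reverse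
          = ((df before).take n).reverse ++ [p] := by
        rw [e2, hn, List.take_succ_cons, List.reverse_cons, e5]
      rw [e3]
      by_cases hlen : f.toNat ≤ (df before).length
      · have hnlt : n < (df before).length := by omega
        have e4 : (df before).take f.toNat = (df before).take n ++ [(df before)[n]] := by
          rw [hn, List.take_add_one, List.getElem?_eq_getElem hnlt]
          rfl
        rw [e4, List.reverse_append, List.reverse_singleton, List.singleton_append,
          List.cons_append]
        simp only [aTrim]
        rw [if_pos (by
          simp only [List.length_cons, List.length_append, List.length_reverse,
            List.length_take, List.length_nil]
          push_cast
          omega)]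
        rw [aTrim_id hf (by
          simp only [List.length_append, List.length_reverse, List.length_take,
            List.length_cons, List.length_nil]
          push_cast
          omega)]
      · have hsmall : (df before).length ≤ n := by omega
        rw [List.take_of_length_le (by omega), List.take_of_length_le hsmall]
        rw [aTrim_id hf (by
          simp only [List.length_append, List.length_reverse, List.length_cons,
            List.length_nil]
          push_cast
          omega)]

-- the folded loops agree
theorem fold_eq {f : Int} (hf : 0 ≤ f) : ∀ (rest before : List Int) (h m : Int),
    rest.foldl (aStep f) (h, m, ((df before).take f.toNat).reverse) =
      ((rest.foldl (bStep f) (h, before)).1,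
       m + ((h + rest.length) - (rest.foldl (bStep f) (h, before)).1),
       ((df ((rest.foldl (bStep f) (h, before)).2)).take f.toNat).reverse) := by
  intro rest
  induction rest with
  | nil => intro before h m; simp
  | cons p rest' ih =>
    intro before h m
    simp only [List.foldl_cons, step_eq hf before h m p, bStep]
    by_cases hb : bScan p f before PySem.Set.empty
    · simp only [hb, if_true]
      rw [ih (p :: before) (h + 1) m]
      simp only [List.length_cons, Prod.mk.injEq]
      refine ⟨trivial, ?_, trivial⟩
      push_cast
      ring
    · simp only [hb, if_false, Bool.false_eq_true]
      rw [ih (p :: before) h (m + 1)]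
      simp only [List.length_cons, Prod.mk.injEq]
      refine ⟨trivial, ?_, trivial⟩
      push_cast
      ring

-- ===== VERDICT (by name: the statement is the Claim_ definition above) =====
theorem LRU_replacement_spec : Claim_equal_LRU_replacement := by
  intro pages frames _ hpre
  unfold Spec_LRU_replacement LRU_replacement LRU_replacement_alt
  rcases hpre with hf | rfl
  · have := fold_eq hf pages [] 0 0
    simp only [df, List.take_nil, List.reverse_nil] at this
    rw [this]
    rcases hb : pages.foldl (bStep frames) (0, []) with ⟨hits, before⟩
    simp only [List.cons.injEq, and_true]
    constructor
    · trivial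
    · omega
  · simp
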